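-- pv_equiv track=rewrite | github.com/JinDDung2/algorithm-pratice | programmas/lv2/discount_event.py | solution
-- ===== SOURCE A (Python) =====
-- def solution(want, number, discount):
--     answer = 0
--
--     wish = {}
--     now = {} # 10일 동안 가지고 올 수 있는 상품들
--
--     # 딕셔너리 만들기
--     for i in range(len(want)):
--         wish[want[i]] = number[i]
--         now[want[i]] = 0
--
--
--     for i in range(len(discount)):
--         # 10일전 으로 시작
--         before = i - 10
--         if before >= 0 and discount[before] in want:
--             # 10일이 지난 물품의 개수는 삭제
--             if now[discount[before]] > 0:
--                 now[discount[before]] -= 1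
--
--         # 내가 갖고 싶은 물건이면 수량 증가
--         if discount[i] in want:
--             now[discount[i]] += 1
--
--         is_buy = True
--         for key in wish.keys():
--             if wish[key] > now[key]:
--                 is_buy = False
--                 break
--         if is_buy:
--             answer += 1
--     return answer
-- ===== SOURCE B (Python) =====
-- def solution(want, number, discount):
--     need = dict(zip(want, number))
--     cnt = dict.fromkeys(need, 0)
--     total = len(need)
--     satisfied = sum(1 for k in need if cnt[k] >= need[k])
--     answer = 0
--     for i, item in enumerate(discount):
--         if i >= 10:
--             old = discount[i - 10]
--             if old in cnt:
--                 if cnt[old] == need[old]: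
--                     satisfied -= 1
--                 cnt[old] -= 1
--         if item in cnt:
--             if cnt[item] + 1 == need[item]:
--                 satisfied += 1
--             cnt[item] += 1
--         if satisfied == total:
--             answer += 1
--     return answer
-- ===== Notes on version B (the rewrite author's own statement) =====
-- stated objective: faster
-- what changed: Replaced the per-day full rescan of all wished items by a sliding window that incrementally maintains a count of currently satisfied items, so each day costs O(1) instead of O(k).
import Mathlib
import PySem

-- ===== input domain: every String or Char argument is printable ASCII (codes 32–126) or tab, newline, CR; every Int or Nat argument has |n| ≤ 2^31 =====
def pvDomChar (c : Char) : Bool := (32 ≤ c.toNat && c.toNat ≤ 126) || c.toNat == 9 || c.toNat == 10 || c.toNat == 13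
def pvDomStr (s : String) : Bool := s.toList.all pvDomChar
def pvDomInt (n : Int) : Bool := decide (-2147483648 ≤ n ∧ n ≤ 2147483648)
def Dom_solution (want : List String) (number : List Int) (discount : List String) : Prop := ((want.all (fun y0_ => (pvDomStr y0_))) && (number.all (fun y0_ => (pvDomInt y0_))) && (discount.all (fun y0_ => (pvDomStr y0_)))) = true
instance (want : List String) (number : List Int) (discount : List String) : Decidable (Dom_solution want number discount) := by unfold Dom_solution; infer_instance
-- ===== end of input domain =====

-- B replaces A's per-day rescan of every wished item by a sliding window that maintains the
-- number of currently satisfied items incrementally (objective: faster, O(n+k) vs O(n*k)).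

-- ===== PORT A =====
def solution (want : List String) (number : List Int) (discount : List String) : Int :=
  -- wish[want[i]] = number[i]; now[want[i]] = 0
  let build := (PySem.List.pyRange 0 (want.length : Int) 1).foldl
      (fun (st : PySem.Dict String Int × PySem.Dict String Int) i =>
        (st.1.insert (PySem.List.pyGetD want i "") (PySem.List.pyGetD number i 0),
         st.2.insert (PySem.List.pyGetD want i "") 0))
      (PySem.Dict.empty, PySem.Dict.empty)
  let wish := build.1
  let final := (PySem.List.pyRange 0 (discount.length : Int) 1).foldl
      (fun (st : PySem.Dict String Int × Int) i =>
        let before := i - 10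
        let b := PySem.List.pyGetD discount before ""
        let now1 := if 0 ≤ before ∧ want.contains b = true then
                      (if 0 < st.1.getD b 0 then st.1.insert b (st.1.getD b 0 - 1) else st.1)
                    else st.1
        let x := PySem.List.pyGetD discount i ""
        let now2 := if want.contains x = true then now1.insert x (now1.getD x 0 + 1) else now1
        -- 'for key in wish.keys(): if wish[key] > now[key]: is_buy = False; break'
        let isBuy := wish.keys.all (fun k => !decide (now2.getD k 0 < wish.getD k 0))
        (now2, if isBuy then st.2 + 1 else st.2))
      (build.2, 0)
  final.2

-- ===== PORT B =====
def solution_alt (want : List String) (number : List Int) (discount : List String) : Int :=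
  let need : PySem.Dict String Int := PySem.Dict.ofList (want.zip number)
  -- cnt = dict.fromkeys(need, 0)
  let cnt0 : PySem.Dict String Int := need.keys.foldl (fun d k => d.insert k 0) PySem.Dict.empty
  let total : Int := need.size
  let sat0 : Int := (need.keys.countP (fun k => decide (need.getD k 0 ≤ cnt0.getD k 0)) : Int)
  let final := (PySem.List.enumerate discount 0).foldl
      (fun (st : PySem.Dict String Int × Int × Int) p =>
        let i := p.1
        let item := p.2
        let s1 := if 10 ≤ i then
            let old := PySem.List.pyGetD discount (i - 10) ""
            if st.1.contains old then
              (st.1.insert old (st.1.getD old 0 - 1),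
               if st.1.getD old 0 == (need.getD old 0 : Int) then st.2.1 - 1 else st.2.1)
            else (st.1, st.2.1)
          else (st.1, st.2.1)
        let s2 := if s1.1.contains item then
            (s1.1.insert item (s1.1.getD item 0 + 1),
             if s1.1.getD item 0 + 1 == (need.getD item 0 : Int) then s1.2 + 1 else s1.2)
          else s1
        (s2.1, s2.2, if s2.2 == total then st.2.2 + 1 else st.2.2))
      (cnt0, sat0, 0)
  final.2.2

-- ===== PRECONDITION & SPEC =====
-- Pre_ excludes exactly the inputs where A raises IndexError: number shorter than want
-- (A reads number[i] for every index i of want).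
def Pre_solution (want : List String) (number : List Int) (discount : List String) : Prop :=
  want.length ≤ number.length
instance (want : List String) (number : List Int) (discount : List String) : Decidable (Pre_solution want number discount) := by unfold Pre_solution; infer_instance
def pvWitness_solution : List String × List Int × List String := (["a"], [1], ["a", "b", "a"])

def Spec_solution (want : List String) (number : List Int) (discount : List String) (out : Int) : Prop := out = solution_alt want number discount
instance (want : List String) (number : List Int) (discount : List String) (out : Int) : Decidable (Spec_solution want number discount out) := by unfold Spec_solution; infer_instance

-- ===== CLAIM (what is proved, stated in full; the proofs are below) =====
def Claim_equal_solution : Prop := ∀ (want : List String) (number : List Int) (discount : List String), Dom_solution want number discount → Pre_solution want number discount → Spec_solution want number discount (solution want number discount)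
-- ===== LEMMAS AND PROOFS =====

-- named step functions
def stepA (want discount : List String) (wish : PySem.Dict String Int)
    (st : PySem.Dict String Int × Int) (i : Int) : PySem.Dict String Int × Int :=
  let before := i - 10
  let b := PySem.List.pyGetD discount before ""
  let now1 := if 0 ≤ before ∧ want.contains b = true then
                (if 0 < st.1.getD b 0 then st.1.insert b (st.1.getD b 0 - 1) else st.1)
              else st.1
  let x := PySem.List.pyGetD discount i ""
  let now2 := if want.contains x = true then now1.insert x (now1.getD x 0 + 1) else now1
  let isBuy := wish.keys.all (fun k => !decide (now2.getD k 0 < wish.getD k 0))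
  (now2, if isBuy then st.2 + 1 else st.2)

def stepB (discount : List String) (need : PySem.Dict String Int) (total : Int)
    (st : PySem.Dict String Int × Int × Int) (p : Int × String) : PySem.Dict String Int × Int × Int :=
  let i := p.1
  let item := p.2
  let s1 := if 10 ≤ i then
      let old := PySem.List.pyGetD discount (i - 10) ""
      if st.1.contains old then
        (st.1.insert old (st.1.getD old 0 - 1),
         if st.1.getD old 0 == (need.getD old 0 : Int) then st.2.1 - 1 else st.2.1)
      else (st.1, st.2.1)
    else (st.1, st.2.1)
  let s2 := if s1.1.contains item then
      (s1.1.insert item (s1.1.getD item 0 + 1),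
       if s1.1.getD item 0 + 1 == (need.getD item 0 : Int) then s1.2 + 1 else s1.2)
    else s1
  (s2.1, s2.2, if s2.2 == total then st.2.2 + 1 else st.2.2)

def now0 (want : List String) : PySem.Dict String Int :=
  want.foldl (fun d s => d.insert s 0) PySem.Dict.empty

lemma solution_unfold (want : List String) (number : List Int) (discount : List String) :
    solution want number discount =
    (let build := (PySem.List.pyRange 0 (want.length : Int) 1).foldl
      (fun (st : PySem.Dict String Int × PySem.Dict String Int) i =>
        (st.1.insert (PySem.List.pyGetD want i "") (PySem.List.pyGetD number i 0),
         st.2.insert (PySem.List.pyGetD want i "") 0))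
      (PySem.Dict.empty, PySem.Dict.empty)
     ((PySem.List.pyRange 0 (discount.length : Int) 1).foldl (stepA want discount build.1) (build.2, 0)).2) := rfl

lemma zero_getD (l : List String) (d : PySem.Dict String Int) (h : ∀ s, d.getD s 0 = 0) :
    ∀ s, (l.foldl (fun d k => d.insert k 0) d).getD s 0 = 0 := by
  induction l generalizing d with
  | nil => exact h
  | cons a t ih =>
    intro s
    exact ih _ (fun s' => by rw [PySem.Dict.getD_insert]; split <;> simp [h]) s

lemma ofList_eq_foldl_insert (z : List (String × Int)) :
    z.foldl (fun d p => d.insert p.1 p.2) PySem.Dict.empty = PySem.Dict.ofList z := rfl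

lemma build_eq (want : List String) (number : List Int) (h : want.length ≤ number.length) :
    (PySem.List.pyRange 0 (want.length : Int) 1).foldl
      (fun (st : PySem.Dict String Int × PySem.Dict String Int) i =>
        (st.1.insert (PySem.List.pyGetD want i "") (PySem.List.pyGetD number i 0),
         st.2.insert (PySem.List.pyGetD want i "") 0))
      (PySem.Dict.empty, PySem.Dict.empty)
    = (PySem.Dict.ofList (want.zip number), now0 want) := by
  rw [PySem.List.foldl_prod_mk
      (f := fun d (i : Int) => PySem.Dict.insert d (PySem.List.pyGetD want i "") (PySem.List.pyGetD number i 0))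
      (g := fun d (i : Int) => PySem.Dict.insert d (PySem.List.pyGetD want i "") 0)]
  have hz : (want.zip number).length = want.length := by
    simp [List.length_zip]; omega
  refine Prod.ext ?_ ?_
  · dsimp only
    rw [PySem.List.foldl_congr_mem _ _
        (fun d (i : Int) => PySem.Dict.insert d
          (PySem.List.pyGetD (want.zip number) i ("", 0)).1
          (PySem.List.pyGetD (want.zip number) i ("", 0)).2) _
        ?hcong]
    case hcong =>
      intro acc i hi
      rw [PySem.List.mem_pyRange_one] at hi
      have h1 : i < ((want.zip number).length : Int) := by omega
      have h2 : i < ((number.length : Int)) := by omega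
      show acc.insert (PySem.List.pyGetD want i "") (PySem.List.pyGetD number i 0) = _
      rw [PySem.List.pyGetD_eq_getElem want "" hi.1 hi.2,
          PySem.List.pyGetD_eq_getElem number 0 hi.1 h2,
          show (fun d i => PySem.Dict.insert d (PySem.List.pyGetD (want.zip number) i ("", 0)).1 (PySem.List.pyGetD (want.zip number) i ("", 0)).2) acc i = acc.insert (PySem.List.pyGetD (want.zip number) i ("", 0)).1 (PySem.List.pyGetD (want.zip number) i ("", 0)).2 from rfl,
          PySem.List.pyGetD_eq_getElem (want.zip number) ("", 0) hi.1 h1,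
          List.getElem_zip]
    rw [show ((want.length : Int)) = ((want.zip number).length : Int) by rw [hz]]
    rw [PySem.List.foldl_pyRange_zero_pyGetD' (want.zip number) ("", 0)
          (fun d p => PySem.Dict.insert d p.1 p.2) PySem.Dict.empty]
    rfl
  · dsimp only
    rw [PySem.List.foldl_pyRange_zero_pyGetD' want ""
          (fun d s => PySem.Dict.insert d s 0) PySem.Dict.empty]
    rfl

lemma enumerate_eq_map (ds : List String) :
    PySem.List.enumerate ds 0 =
    (PySem.List.pyRange 0 (ds.length : Int) 1).map (fun i => (i, PySem.List.pyGetD ds i "")) := by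
  induction ds using List.reverseRecOn with
  | nil => rfl
  | append_singleton xs x ih =>
    rw [PySem.List.enumerate_append]
    rw [show ((((xs ++ [x]).length : Nat)) : Int) = (xs.length : Int) + 1 by simp]
    rw [PySem.List.pyRange_one_succ_right (by positivity), List.map_append]
    congr 1
    · rw [ih]
      refine List.map_congr_left (fun i hi => ?_)
      rw [PySem.List.mem_pyRange_one] at hi
      have hx : i < ((xs ++ [x]).length : Int) := by simp; omega
      rw [PySem.List.pyGetD_eq_getElem xs "" hi.1 hi.2,
          PySem.List.pyGetD_eq_getElem (xs ++ [x]) "" hi.1 hx,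
          List.getElem_append_left (by omega)]
    · simp only [List.map_cons, List.map_nil, zero_add]
      have hx : (xs.length : Int) < ((xs ++ [x]).length : Int) := by simp
      rw [PySem.List.pyGetD_eq_getElem (xs ++ [x]) "" (by positivity) hx]
      rw [List.getElem_concat_length (by simp)]
      simp [PySem.List.enumerate_cons]

def winP (ds : List String) (k : Nat) : List String := (ds.take k).drop (k - 10)
def midP (ds : List String) (k : Nat) : List String := (ds.take k).drop (k + 1 - 10)

lemma winP_zero (ds : List String) : winP ds 0 = [] := by simp [winP]

lemma midP_eq_winP (ds : List String) (k : Nat) (hk : k < 10) : midP ds k = winP ds k := by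
  unfold midP winP
  rw [Nat.sub_eq_zero_of_le (by omega), Nat.sub_eq_zero_of_le (by omega)]

lemma winP_succ (ds : List String) (k : Nat) (hk : k < ds.length) :
    winP ds (k + 1) = midP ds k ++ [ds[k]] := by
  unfold winP midP
  rw [show k + 1 = k + 1 from rfl, List.take_add_one, List.getElem?_eq_getElem hk]
  simp only [Option.toList_some]
  rw [List.drop_append_of_le_length (by simp [List.length_take]; omega)]

lemma winP_big (ds : List String) (k : Nat) (hk : 10 ≤ k) (hkn : k ≤ ds.length) :
    winP ds k = ds[k - 10]'(by omega) :: midP ds k := by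
  unfold winP midP
  have h1 : k - 10 < (ds.take k).length := by simp [List.length_take]; omega
  rw [List.drop_eq_getElem_cons h1, List.getElem_take]
  congr 2
  omega

lemma countP_shift (K : List String) (hnd : K.Nodup) (x : String) (hx : x ∈ K)
    (p q : String → Bool) (h : ∀ y ∈ K, y ≠ x → q y = p y) :
    (K.countP q : Int) = (K.countP p : Int) + (if q x then 1 else 0) - (if p x then 1 else 0) := by
  have hperm : K.Perm (x :: K.erase x) := List.perm_cons_erase hx
  have hq := hperm.countP_eq q
  have hp := hperm.countP_eq p
  have hok : ∀ y ∈ K.erase x, q y = p y := by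
    intro y hy
    have hyK : y ∈ K := List.mem_of_mem_erase hy
    have hyx : y ≠ x := by
      intro he; subst he
      exact (List.Nodup.not_mem_erase hnd) hy
    exact h y hyK hyx
  have heq : (K.erase x).countP q = (K.erase x).countP p :=
    List.countP_congr (fun y hy => by rw [hok y hy])
  rw [hq, hp, List.countP_cons, List.countP_cons, heq]
  push_cast
  by_cases h1 : q x <;> by_cases h2 : p x <;> simp [h1, h2]

def chrP (want w : List String) (d : PySem.Dict String Int) : Prop :=
  (∀ s : String, d.getD s 0 = if s ∈ want then ((w.count s : Int)) else 0) ∧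
  d.keys = PySem.Set.ofList want

lemma chr_contains (want w : List String) (d : PySem.Dict String Int) (hd : chrP want w d)
    (s : String) : d.contains s = decide (s ∈ want) := by
  rcases hd with ⟨-, hk⟩
  by_cases hs : s ∈ want
  · simp [hs, (PySem.Dict.contains_iff_mem_keys d s).mpr (hk ▸ (PySem.Set.mem_ofList want s).mpr hs)]
  · have hnc : ¬ d.contains s = true := fun hc =>
      hs ((PySem.Set.mem_ofList want s).mp (hk ▸ (PySem.Dict.contains_iff_mem_keys d s).mp hc))
    simp [hs, Bool.eq_false_iff.mpr hnc]

lemma chr_remove (want ds : List String) (k : Nat) (hk : 10 ≤ k) (hkn : k ≤ ds.length)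
    (hb : ds[k - 10]'(by omega) ∈ want) (d : PySem.Dict String Int)
    (hd : chrP want (winP ds k) d) :
    chrP want (midP ds k)
      (d.insert (ds[k - 10]'(by omega)) (d.getD (ds[k - 10]'(by omega)) 0 - 1)) := by
  rcases hd with ⟨hg, hkeys⟩
  have hwin := winP_big ds k hk hkn
  constructor
  · intro s
    rw [PySem.Dict.getD_insert]
    by_cases hs : s = ds[k - 10]'(by omega)
    · subst hs
      simp only [hg ds[k - 10], if_pos hb, hwin, List.count_cons_self]
      push_cast; ring
    · rw [if_neg hs, hg s]
      split
      · rw [hwin, List.count_cons_of_ne (by exact fun h => hs h.symm)]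
      · rfl
  · rw [PySem.Dict.keys_insert_of_contains d _ (by
      rw [chr_contains want (winP ds k) d ⟨hg, hkeys⟩]; simp [hb]), hkeys]

lemma chr_mid_of_not_mem (want ds : List String) (k : Nat) (hk : 10 ≤ k) (hkn : k ≤ ds.length)
    (hb : ds[k - 10]'(by omega) ∉ want) (d : PySem.Dict String Int)
    (hd : chrP want (winP ds k) d) : chrP want (midP ds k) d := by
  rcases hd with ⟨hg, hkeys⟩
  refine ⟨fun s => ?_, hkeys⟩
  rw [hg s]
  split
  · next hs =>
    rw [winP_big ds k hk hkn, List.count_cons_of_ne (by rintro rfl; exact hb hs)]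
  · rfl

lemma chr_add (want ds : List String) (k : Nat) (hkn : k < ds.length)
    (hx : ds[k] ∈ want) (d : PySem.Dict String Int) (hd : chrP want (midP ds k) d) :
    chrP want (winP ds (k + 1)) (d.insert ds[k] (d.getD ds[k] 0 + 1)) := by
  rcases hd with ⟨hg, hkeys⟩
  have hwin := winP_succ ds k hkn
  constructor
  · intro s
    rw [PySem.Dict.getD_insert]
    by_cases hs : s = ds[k]
    · subst hs
      simp only [hg ds[k], if_pos hx, hwin, List.count_append]
      simp
    · rw [if_neg hs, hg s]
      split
      · rw [hwin, List.count_append,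
           List.count_eq_zero.mpr (show s ∉ [ds[k]] by simp [hs])]
        norm_num
      · rfl
  · rw [PySem.Dict.keys_insert_of_contains d _ (by
      rw [chr_contains want (midP ds k) d ⟨hg, hkeys⟩]; simp [hx]), hkeys]

lemma chr_win1_of_not_mem (want ds : List String) (k : Nat) (hkn : k < ds.length)
    (hx : ds[k] ∉ want) (d : PySem.Dict String Int) (hd : chrP want (midP ds k) d) :
    chrP want (winP ds (k + 1)) d := by
  rcases hd with ⟨hg, hkeys⟩
  refine ⟨fun s => ?_, hkeys⟩
  rw [hg s]
  split
  · next hs =>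
    rw [winP_succ ds k hkn, List.count_append,
       List.count_eq_zero.mpr (show s ∉ [ds[k]] by simp; rintro rfl; exact hx hs)]
    norm_num
  · rfl

def pwP (D : PySem.Dict String Int) (w : List String) : String → Bool :=
  fun s => decide (D.getD s 0 ≤ ((w.count s : Int)))

lemma sat_remove (want ds : List String) (D : PySem.Dict String Int)
    (hKw : ∀ s, s ∈ D.keys ↔ s ∈ want) (hnd : D.keys.Nodup)
    (k : Nat) (hk : 10 ≤ k) (hkn : k ≤ ds.length) (hb : ds[k - 10]'(by omega) ∈ want) :
    (D.keys.countP (pwP D (midP ds k)) : Int) =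
      if ((winP ds k).count (ds[k - 10]'(by omega)) : Int) = D.getD (ds[k - 10]'(by omega)) 0
      then (D.keys.countP (pwP D (winP ds k)) : Int) - 1
      else (D.keys.countP (pwP D (winP ds k)) : Int) := by
  have hbK : ds[k - 10]'(by omega) ∈ D.keys := (hKw _).mpr hb
  have hcount : (winP ds k).count (ds[k - 10]'(by omega)) =
      (midP ds k).count (ds[k - 10]'(by omega)) + 1 := by
    rw [winP_big ds k hk hkn, List.count_cons_self]
  have hoff : ∀ y ∈ D.keys, y ≠ ds[k - 10]'(by omega) →
      pwP D (midP ds k) y = pwP D (winP ds k) y := by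
    intro y _ hy
    unfold pwP
    rw [winP_big ds k hk hkn, List.count_cons_of_ne (fun h => hy h.symm)]
  have hshift := countP_shift D.keys hnd _ hbK (pwP D (winP ds k)) (pwP D (midP ds k)) hoff
  rw [hshift]
  unfold pwP
  rw [hcount]
  push_cast
  split_ifs with h1 h2 h3 h4 h5 h6 h7 <;> simp [decide_eq_true_eq] at * <;> omega

lemma sat_nochange_remove (want ds : List String) (D : PySem.Dict String Int)
    (hKw : ∀ s, s ∈ D.keys ↔ s ∈ want)
    (k : Nat) (hk : 10 ≤ k) (hkn : k ≤ ds.length) (hb : ds[k - 10]'(by omega) ∉ want) :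
    D.keys.countP (pwP D (midP ds k)) = D.keys.countP (pwP D (winP ds k)) := by
  refine List.countP_congr (fun y hy => ?_)
  have : y ≠ ds[k - 10]'(by omega) := by rintro rfl; exact hb ((hKw _).mp hy)
  unfold pwP
  rw [winP_big ds k hk hkn, List.count_cons_of_ne (fun h => this h.symm)]

lemma sat_add (want ds : List String) (D : PySem.Dict String Int)
    (hKw : ∀ s, s ∈ D.keys ↔ s ∈ want) (hnd : D.keys.Nodup)
    (k : Nat) (hkn : k < ds.length) (hx : ds[k] ∈ want) :
    (D.keys.countP (pwP D (winP ds (k + 1))) : Int) =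
      if ((midP ds k).count ds[k] : Int) + 1 = D.getD ds[k] 0
      then (D.keys.countP (pwP D (midP ds k)) : Int) + 1
      else (D.keys.countP (pwP D (midP ds k)) : Int) := by
  have hxK : ds[k] ∈ D.keys := (hKw _).mpr hx
  have hcount : (winP ds (k + 1)).count ds[k] = (midP ds k).count ds[k] + 1 := by
    rw [winP_succ ds k hkn, List.count_append, List.count_singleton]
    simp
  have hoff : ∀ y ∈ D.keys, y ≠ ds[k] →
      pwP D (winP ds (k + 1)) y = pwP D (midP ds k) y := by
    intro y _ hy
    unfold pwP
    rw [winP_succ ds k hkn, List.count_append,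
        List.count_eq_zero.mpr (show y ∉ [ds[k]] by simp [hy])]
    norm_num
  have hshift := countP_shift D.keys hnd _ hxK (pwP D (midP ds k)) (pwP D (winP ds (k + 1))) hoff
  rw [hshift]
  unfold pwP
  rw [hcount]
  push_cast
  split_ifs with h1 h2 h3 h4 h5 h6 h7 <;> simp [decide_eq_true_eq] at * <;> omega

lemma sat_nochange_add (want ds : List String) (D : PySem.Dict String Int)
    (hKw : ∀ s, s ∈ D.keys ↔ s ∈ want)
    (k : Nat) (hkn : k < ds.length) (hx : ds[k] ∉ want) :
    D.keys.countP (pwP D (winP ds (k + 1))) = D.keys.countP (pwP D (midP ds k)) := by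
  refine List.countP_congr (fun y hy => ?_)
  have hne : y ≠ ds[k] := by rintro rfl; exact hx ((hKw _).mp hy)
  unfold pwP
  rw [winP_succ ds k hkn, List.count_append,
      List.count_eq_zero.mpr (show y ∉ [ds[k]] by simp [hne])]
  norm_num

lemma buy_iff (D : PySem.Dict String Int) (w : List String) (d : PySem.Dict String Int)
    (hd : ∀ s ∈ D.keys, d.getD s 0 = (w.count s : Int)) :
    (D.keys.all (fun s => !decide (d.getD s 0 < D.getD s 0)))
    = (((D.keys.countP (pwP D w) : Int)) == (D.size : Int)) := by
  have hsz : D.keys.length = D.size := by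
    simp [PySem.Dict.keys, PySem.Dict.size]
  rw [Bool.eq_iff_iff]
  simp only [List.all_eq_true, beq_iff_eq, Bool.not_eq_eq_eq_not, Bool.not_true,
    decide_eq_false_iff_not, not_lt]
  rw [show ((D.size : Int)) = ((D.keys.length : Int)) by rw [hsz], Int.natCast_inj]
  rw [List.countP_eq_length]
  constructor
  · intro hall s hs
    unfold pwP
    rw [← hd s hs]
    simp [hall s hs]
  · intro hall s hs
    have := hall s hs
    unfold pwP at this
    rw [← hd s hs] at this
    simpa using this

def remA (want ds : List String) (d : PySem.Dict String Int) (i : Int) : PySem.Dict String Int :=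
  let b := PySem.List.pyGetD ds (i - 10) ""
  if 0 ≤ i - 10 ∧ want.contains b = true then
    (if 0 < d.getD b 0 then d.insert b (d.getD b 0 - 1) else d)
  else d

def addA (want ds : List String) (d : PySem.Dict String Int) (i : Int) : PySem.Dict String Int :=
  let x := PySem.List.pyGetD ds i ""
  if want.contains x = true then d.insert x (d.getD x 0 + 1) else d

lemma stepA_eq (want ds : List String) (wish : PySem.Dict String Int)
    (st : PySem.Dict String Int × Int) (i : Int) :
    stepA want ds wish st i =
      (addA want ds (remA want ds st.1 i) i,
       if (wish.keys.all (fun k => !decide ((addA want ds (remA want ds st.1 i) i).getD k 0 < wish.getD k 0)))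
       then st.2 + 1 else st.2) := rfl

def remB (ds : List String) (need : PySem.Dict String Int)
    (st : PySem.Dict String Int × Int) (i : Int) : PySem.Dict String Int × Int :=
  if 10 ≤ i then
    let old := PySem.List.pyGetD ds (i - 10) ""
    if st.1.contains old then
      (st.1.insert old (st.1.getD old 0 - 1),
       if st.1.getD old 0 == (need.getD old 0 : Int) then st.2 - 1 else st.2)
    else st
  else st

def addB (need : PySem.Dict String Int)
    (st : PySem.Dict String Int × Int) (item : String) : PySem.Dict String Int × Int :=
  if st.1.contains item then
    (st.1.insert item (st.1.getD item 0 + 1),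
     if st.1.getD item 0 + 1 == (need.getD item 0 : Int) then st.2 + 1 else st.2)
  else st

lemma stepB_eq (ds : List String) (need : PySem.Dict String Int) (total : Int)
    (st : PySem.Dict String Int × Int × Int) (p : Int × String) :
    stepB ds need total st p =
      ((addB need (remB ds need (st.1, st.2.1) p.1) p.2).1,
       (addB need (remB ds need (st.1, st.2.1) p.1) p.2).2,
       if (addB need (remB ds need (st.1, st.2.1) p.1) p.2).2 == total
       then st.2.2 + 1 else st.2.2) := by
  unfold stepB remB addB
  rcases st with ⟨c, s, a⟩
  rcases p with ⟨i, item⟩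
  rfl

lemma rem_sim (want ds : List String) (D : PySem.Dict String Int)
    (hKw : ∀ s, s ∈ D.keys ↔ s ∈ want) (hnd : D.keys.Nodup)
    (k : Nat) (hkn : k ≤ ds.length)
    (dA dB : PySem.Dict String Int) (sat : Int)
    (hA : chrP want (winP ds k) dA) (hB : chrP want (winP ds k) dB)
    (hs : sat = (D.keys.countP (pwP D (winP ds k)) : Int)) :
    chrP want (midP ds k) (remA want ds dA (k : Int)) ∧
    chrP want (midP ds k) (remB ds D (dB, sat) (k : Int)).1 ∧
    (remB ds D (dB, sat) (k : Int)).2 = (D.keys.countP (pwP D (midP ds k)) : Int) := by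
  by_cases hc : 10 ≤ k
  · have hbi : ((k : Int) - 10) = (((k - 10 : Nat)) : Int) := by omega
    have hlt : k - 10 < ds.length := by omega
    have hbv : PySem.List.pyGetD ds ((k : Int) - 10) "" = ds[k - 10] := by
      rw [hbi, PySem.List.pyGetD_eq_getElem ds "" (by positivity) (by exact_mod_cast hlt)]
      simp
    by_cases hbw : ds[k - 10] ∈ want
    · -- both remove
      have hguardA : (0 ≤ (k : Int) - 10 ∧ want.contains (PySem.List.pyGetD ds ((k : Int) - 10) "") = true) := by
        refine ⟨by omega, ?_⟩
        rw [hbv, List.contains_eq_mem]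
        simp [hbw]
      have hpos : 0 < dA.getD (PySem.List.pyGetD ds ((k : Int) - 10) "") 0 := by
        rw [hbv, hA.1 _, if_pos hbw, winP_big ds k hc hkn, List.count_cons_self]
        positivity
      have hcB : dB.contains (PySem.List.pyGetD ds ((k : Int) - 10) "") = true := by
        rw [hbv, chr_contains want _ dB hB]
        simp [hbw]
      constructor
      · unfold remA
        rw [if_pos hguardA, if_pos hpos, hbv]
        exact chr_remove want ds k hc hkn hbw dA hA
      constructor
      · unfold remB
        rw [if_pos (show (10 : Int) ≤ (k : Int) by omega)]
        dsimp only
        rw [if_pos hcB]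
        dsimp only
        rw [hbv]
        exact chr_remove want ds k hc hkn hbw dB hB
      · unfold remB
        rw [if_pos (show (10 : Int) ≤ (k : Int) by omega)]
        dsimp only
        rw [if_pos hcB]
        dsimp only
        rw [hbv, hB.1 _, if_pos hbw, hs, sat_remove want ds D hKw hnd k hc hkn hbw]
        simp only [beq_iff_eq]
    · -- no removal: item not wished
      have hguardA : ¬ (0 ≤ (k : Int) - 10 ∧ want.contains (PySem.List.pyGetD ds ((k : Int) - 10) "") = true) := by
        rintro ⟨-, hcon⟩
        rw [hbv, List.contains_eq_mem] at hcon
        simp at hcon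
        exact hbw hcon
      have hcB : dB.contains (PySem.List.pyGetD ds ((k : Int) - 10) "") = false := by
        rw [hbv, chr_contains want _ dB hB]
        simp [hbw]
      refine ⟨?_, ?_, ?_⟩
      · unfold remA
        rw [if_neg hguardA]
        exact chr_mid_of_not_mem want ds k hc hkn hbw dA hA
      · unfold remB
        rw [if_pos (show (10 : Int) ≤ (k : Int) by omega)]
        dsimp only
        rw [hcB]
        simp only [Bool.false_eq_true, if_false]
        exact chr_mid_of_not_mem want ds k hc hkn hbw dB hB
      · unfold remB
        rw [if_pos (show (10 : Int) ≤ (k : Int) by omega)]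
        dsimp only
        rw [hcB]
        simp only [Bool.false_eq_true, if_false]
        rw [hs, sat_nochange_remove want ds D hKw k hc hkn hbw]
  · -- k < 10: neither side removes
    have hmw := midP_eq_winP ds k (by omega)
    have hguardA : ¬ (0 ≤ (k : Int) - 10 ∧ want.contains (PySem.List.pyGetD ds ((k : Int) - 10) "") = true) := by
      rintro ⟨hge, -⟩
      omega
    refine ⟨?_, ?_, ?_⟩
    · unfold remA
      rw [if_neg hguardA, hmw]
      exact hA
    · unfold remB
      rw [if_neg (show ¬ (10 : Int) ≤ (k : Int) by omega), hmw]
      exact hB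
    · unfold remB
      rw [if_neg (show ¬ (10 : Int) ≤ (k : Int) by omega), hmw]
      exact hs

lemma add_sim (want ds : List String) (D : PySem.Dict String Int)
    (hKw : ∀ s, s ∈ D.keys ↔ s ∈ want) (hnd : D.keys.Nodup)
    (k : Nat) (hkn : k < ds.length)
    (dA dB : PySem.Dict String Int) (sat : Int)
    (hA : chrP want (midP ds k) dA) (hB : chrP want (midP ds k) dB)
    (hs : sat = (D.keys.countP (pwP D (midP ds k)) : Int)) :
    chrP want (winP ds (k + 1)) (addA want ds dA (k : Int)) ∧
    chrP want (winP ds (k + 1)) (addB D (dB, sat) (PySem.List.pyGetD ds (k : Int) "")).1 ∧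
    (addB D (dB, sat) (PySem.List.pyGetD ds (k : Int) "")).2
      = (D.keys.countP (pwP D (winP ds (k + 1))) : Int) := by
  have hxv : PySem.List.pyGetD ds (k : Int) "" = ds[k] := by
    rw [PySem.List.pyGetD_eq_getElem ds "" (by positivity) (by exact_mod_cast hkn)]
    simp
  by_cases hxw : ds[k] ∈ want
  · have hguardA : want.contains (PySem.List.pyGetD ds (k : Int) "") = true := by
      rw [hxv, List.contains_eq_mem]; simp [hxw]
    have hcB : dB.contains (PySem.List.pyGetD ds (k : Int) "") = true := by
      rw [hxv, chr_contains want _ dB hB]; simp [hxw]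
    refine ⟨?_, ?_, ?_⟩
    · unfold addA
      rw [if_pos hguardA, hxv]
      exact chr_add want ds k hkn hxw dA hA
    · unfold addB
      rw [if_pos hcB]
      dsimp only
      rw [hxv]
      exact chr_add want ds k hkn hxw dB hB
    · unfold addB
      rw [if_pos hcB]
      dsimp only
      rw [hxv, hB.1 _, if_pos hxw, hs, sat_add want ds D hKw hnd k hkn hxw]
      simp only [beq_iff_eq]
  · have hguardA : ¬ want.contains (PySem.List.pyGetD ds (k : Int) "") = true := by
      rw [hxv, List.contains_eq_mem]; simp [hxw]
    have hcB : dB.contains (PySem.List.pyGetD ds (k : Int) "") = false := by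
      rw [hxv, chr_contains want _ dB hB]; simp [hxw]
    refine ⟨?_, ?_, ?_⟩
    · unfold addA
      rw [if_neg hguardA]
      exact chr_win1_of_not_mem want ds k hkn hxw dA hA
    · unfold addB
      rw [hcB]
      simp only [Bool.false_eq_true, if_false]
      exact chr_win1_of_not_mem want ds k hkn hxw dB hB
    · unfold addB
      rw [hcB]
      simp only [Bool.false_eq_true, if_false]
      rw [hs, sat_nochange_add want ds D hKw k hkn hxw]

lemma keys_now0 (want : List String) : (now0 want).keys = PySem.Set.ofList want := by
  unfold now0
  rw [PySem.Dict.keys_foldl_insert want (fun _ _ => (0 : Int)) PySem.Dict.empty]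
  rfl

lemma chr_now0 (want : List String) : chrP want [] (now0 want) := by
  refine ⟨fun s => ?_, keys_now0 want⟩
  unfold now0
  rw [zero_getD want PySem.Dict.empty (fun s => by rw [PySem.Dict.getD_empty]) s]
  simp

def cntInit (D : PySem.Dict String Int) : PySem.Dict String Int :=
  D.keys.foldl (fun d k => d.insert k 0) PySem.Dict.empty

lemma keysD (want : List String) (number : List Int) (h : want.length ≤ number.length) :
    (PySem.Dict.ofList (want.zip number)).keys = PySem.Set.ofList want := by
  rw [← ofList_eq_foldl_insert]
  rw [PySem.Dict.keys_foldl_insert_key (want.zip number) Prod.fst (fun _ p => p.2) PySem.Dict.empty]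
  rw [List.map_fst_zip h]
  rfl

lemma chr_cntInit (want : List String) (D : PySem.Dict String Int)
    (hkeys : D.keys = PySem.Set.ofList want) : chrP want [] (cntInit D) := by
  constructor
  · intro s
    unfold cntInit
    rw [zero_getD D.keys PySem.Dict.empty (fun s => by rw [PySem.Dict.getD_empty]) s]
    simp
  · show (cntInit D).keys = _
    unfold cntInit
    rw [PySem.Dict.keys_foldl_insert D.keys (fun _ _ => (0 : Int)) PySem.Dict.empty]
    show PySem.Set.update PySem.Dict.empty.keys D.keys = _
    rw [show PySem.Set.update PySem.Dict.empty.keys D.keys = PySem.Set.ofList D.keys from rfl]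
    rw [hkeys]
    exact PySem.Set.ofList_eq_self_of_nodup _ (PySem.Set.nodup_ofList want)

lemma satInit_eq (D : PySem.Dict String Int) :
    ((D.keys.countP (fun k => decide (D.getD k 0 ≤ (cntInit D).getD k 0)) : Nat) : Int)
      = (D.keys.countP (pwP D []) : Int) := by
  congr 1
  refine List.countP_congr (fun y _ => ?_)
  unfold cntInit pwP
  rw [zero_getD D.keys PySem.Dict.empty (fun s => by rw [PySem.Dict.getD_empty]) y]
  simp

def AfoldD (want ds : List String) (D : PySem.Dict String Int) (k : Nat) :
    PySem.Dict String Int × Int :=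
  (PySem.List.pyRange 0 (k : Int) 1).foldl (stepA want ds D) (now0 want, 0)

def BfoldD (ds : List String) (D : PySem.Dict String Int) (k : Nat) :
    PySem.Dict String Int × Int × Int :=
  (PySem.List.pyRange 0 (k : Int) 1).foldl
    (fun st i => stepB ds D (D.size : Int) st (i, PySem.List.pyGetD ds i ""))
    (cntInit D, ((D.keys.countP (fun k => decide (D.getD k 0 ≤ (cntInit D).getD k 0)) : Nat) : Int), 0)

lemma sim (want ds : List String) (D : PySem.Dict String Int)
    (hKw : ∀ s, s ∈ D.keys ↔ s ∈ want) (hnd : D.keys.Nodup)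
    (hcnt : chrP want [] (cntInit D)) (hnow : chrP want [] (now0 want)) :
    ∀ (k : Nat), k ≤ ds.length →
    chrP want (winP ds k) (AfoldD want ds D k).1 ∧
    chrP want (winP ds k) (BfoldD ds D k).1 ∧
    (BfoldD ds D k).2.1 = (D.keys.countP (pwP D (winP ds k)) : Int) ∧
    (AfoldD want ds D k).2 = (BfoldD ds D k).2.2 := by
  intro k
  induction k with
  | zero =>
    intro _
    unfold AfoldD BfoldD
    rw [show ((0 : Nat) : Int) = 0 by norm_num, PySem.List.pyRange_one_eq_nil (by omega)]
    simp only [List.foldl_nil, winP_zero]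
    exact ⟨hnow, hcnt, satInit_eq D, trivial⟩
  | succ k ih =>
    intro hk1
    have hk : k ≤ ds.length := by omega
    have hkn : k < ds.length := by omega
    obtain ⟨hA, hB, hs, ha⟩ := ih hk
    have hsplit : PySem.List.pyRange 0 ((k + 1 : Nat) : Int) 1
        = PySem.List.pyRange 0 (k : Int) 1 ++ [(k : Int)] := by
      rw [show (((k + 1 : Nat)) : Int) = (k : Int) + 1 by push_cast; ring]
      exact PySem.List.pyRange_one_succ_right (by positivity)
    have hAe : AfoldD want ds D (k + 1) = stepA want ds D (AfoldD want ds D k) (k : Int) := by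
      unfold AfoldD
      rw [hsplit, List.foldl_append, List.foldl_cons, List.foldl_nil]
    have hBe : BfoldD ds D (k + 1)
        = stepB ds D (D.size : Int) (BfoldD ds D k) ((k : Int), PySem.List.pyGetD ds (k : Int) "") := by
      unfold BfoldD
      rw [hsplit, List.foldl_append, List.foldl_cons, List.foldl_nil]
    obtain ⟨hA1, hB1, hs1⟩ := rem_sim want ds D hKw hnd k hk
      (AfoldD want ds D k).1 (BfoldD ds D k).1 (BfoldD ds D k).2.1 hA hB hs
    obtain ⟨hA2, hB2, hs2⟩ := add_sim want ds D hKw hnd k hkn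
      (remA want ds (AfoldD want ds D k).1 (k : Int))
      (remB ds D ((BfoldD ds D k).1, (BfoldD ds D k).2.1) (k : Int)).1
      (remB ds D ((BfoldD ds D k).1, (BfoldD ds D k).2.1) (k : Int)).2
      hA1 hB1 hs1
    rw [hAe, hBe, stepA_eq, stepB_eq]
    refine ⟨hA2, hB2, hs2, ?_⟩
    dsimp only
    rw [ha, hs2]
    have hbeq := buy_iff D (winP ds (k + 1))
      (addA want ds (remA want ds (AfoldD want ds D k).1 (k : Int)) (k : Int))
      (fun s hsK => by rw [hA2.1 s, if_pos ((hKw s).mp hsK)])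
    rw [hbeq]

lemma solution_eqA (want : List String) (number : List Int) (ds : List String)
    (h : want.length ≤ number.length) :
    solution want number ds
      = (AfoldD want ds (PySem.Dict.ofList (want.zip number)) ds.length).2 := by
  rw [solution_unfold, build_eq want number h]
  rfl

lemma solution_alt_eqB (want : List String) (number : List Int) (ds : List String) :
    solution_alt want number ds
      = (BfoldD ds (PySem.Dict.ofList (want.zip number)) ds.length).2.2 := by
  rw [show solution_alt want number ds
      = ((PySem.List.enumerate ds 0).foldl
          (stepB ds (PySem.Dict.ofList (want.zip number))
            ((PySem.Dict.ofList (want.zip number)).size : Int))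
          (cntInit (PySem.Dict.ofList (want.zip number)),
           (((PySem.Dict.ofList (want.zip number)).keys.countP
              (fun k => decide ((PySem.Dict.ofList (want.zip number)).getD k 0
                ≤ (cntInit (PySem.Dict.ofList (want.zip number))).getD k 0)) : Nat) : Int),
           0)).2.2 from rfl]
  rw [enumerate_eq_map ds, List.foldl_map]
  rfl

theorem solution_spec' (want : List String) (number : List Int) (ds : List String)
    (hpre : want.length ≤ number.length) :
    solution want number ds = solution_alt want number ds := by
  have hkeys := keysD want number hpre
  have hKw : ∀ s, s ∈ (PySem.Dict.ofList (want.zip number)).keys ↔ s ∈ want := fun s => by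
    rw [hkeys]; exact PySem.Set.mem_ofList want s
  obtain ⟨-, -, -, ha⟩ := sim want ds (PySem.Dict.ofList (want.zip number)) hKw
    (PySem.Dict.nodup_keys_ofList (want.zip number))
    (chr_cntInit want _ hkeys) (chr_now0 want) ds.length le_rfl
  rw [solution_eqA want number ds hpre, solution_alt_eqB want number ds, ha]

-- ===== VERDICT (by name: the statement is the Claim_ definition above) =====
theorem solution_spec : Claim_equal_solution := by
  unfold Claim_equal_solution
  intro want number discount _ hpre
  unfold Spec_solution
  exact solution_spec' want number discount hpre
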